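-- pv_equiv track=rewrite | github.com/ma7dev/Graph-Theory-with-Applications | 1/lp-dag.py | DFS
-- ===== SOURCE A (Python) =====
-- def DFS(adjListEdges, vertex, visited=None, path=None):
--     if visited is None:
--         visited = []
--     if path is None:
--         path = [vertex]
--     visited.append(vertex)
--     paths = []
--     for neighbor in adjListEdges[vertex]:
--         if neighbor not in visited:
--             neighbor_path = path + [neighbor]
--             paths.append(tuple(neighbor_path))
--             paths.extend(DFS(adjListEdges, neighbor, visited[:], neighbor_path))
--     return paths
-- ===== SOURCE B (Python) =====
-- def DFS(adjListEdges, vertex, visited=None, path=None):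
--     if visited is None:
--         visited = []
--     if path is None:
--         path = [vertex]
--     visited.append(vertex)
--     base = list(visited)
--     out = []
--     stack = [(vertex, path, [])]
--     while stack:
--         v, p, chain = stack.pop()
--         if chain:
--             out.append(tuple(p))
--         blocked = set(base)
--         blocked.update(chain)
--         for nb in reversed(adjListEdges[v]):
--             if nb not in blocked:
--                 stack.append((nb, p + [nb], chain + [nb]))
--     return out
-- ===== Notes on version B (the rewrite author's own statement) =====
-- stated objective: alternative
-- what changed: Replaces A's recursive DFS (one call per path prefix, passing copied visited lists down) by an iterative traversal over an explicit stack of (vertex, path, chain) frames, pushing admissible neighbors in reverse order so LIFO popping yields the same preorder output.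
-- outside the precondition, e.g. on DFS({0: [], 1: [5]}, 0, None, None): A returns [], B returns []
import Mathlib
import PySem

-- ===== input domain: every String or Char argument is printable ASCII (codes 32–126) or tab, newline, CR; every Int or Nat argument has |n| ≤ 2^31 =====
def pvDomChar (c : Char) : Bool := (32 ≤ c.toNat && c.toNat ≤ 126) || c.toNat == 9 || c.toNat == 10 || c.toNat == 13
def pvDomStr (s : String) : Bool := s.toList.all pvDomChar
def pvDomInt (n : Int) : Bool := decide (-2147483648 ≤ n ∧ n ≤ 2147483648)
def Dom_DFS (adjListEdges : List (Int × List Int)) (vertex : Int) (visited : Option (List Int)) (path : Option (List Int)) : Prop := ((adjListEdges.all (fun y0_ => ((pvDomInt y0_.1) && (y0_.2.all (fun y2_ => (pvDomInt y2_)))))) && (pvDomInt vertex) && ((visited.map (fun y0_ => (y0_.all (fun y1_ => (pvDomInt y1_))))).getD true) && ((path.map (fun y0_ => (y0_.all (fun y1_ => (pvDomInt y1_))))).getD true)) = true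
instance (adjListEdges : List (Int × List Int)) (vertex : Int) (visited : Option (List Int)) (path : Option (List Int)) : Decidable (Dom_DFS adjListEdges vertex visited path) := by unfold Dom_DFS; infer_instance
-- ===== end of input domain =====

-- B replaces A's recursive DFS by an iterative explicit-stack traversal (reverse pushes
-- reproduce A's preorder); equivalence is about the RETURN value only (both A and B also
-- append `vertex` to a caller-supplied `visited` list in Python, identically).

-- ===== PORT A =====
-- dict lookup, first match; `none` = Python KeyError (excluded by Pre_DFS)
def pvLookup : List (Int × List Int) → Int → Option (List Int)
  | [], _ => none
  | (k, v) :: rest, x => if k = x then some v else pvLookup rest x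

-- fueled transcription of A's recursion; the fuel only makes it total (on Pre_DFS inputs
-- the recursion depth is at most adjListEdges.length + 1, so the fuel never runs out)
def DFSgo (adj : List (Int × List Int)) : Nat → Int → List Int → List Int → List (List Int)
  | 0, _, _, _ => []
  | fuel+1, vertex, visited, path =>
    let vis := visited ++ [vertex]          -- visited.append(vertex)
    match pvLookup adj vertex with
    | none => []                            -- KeyError in Python (outside Pre_DFS)
    | some nbs =>
      nbs.foldl (fun paths nb =>
        if nb ∉ vis then
          paths ++ [path ++ [nb]] ++ DFSgo adj fuel nb vis (path ++ [nb])
        else paths) []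

def DFS (adjListEdges : List (Int × List Int)) (vertex : Int) (visited : Option (List Int)) (path : Option (List Int)) : List (List Int) :=
  let vis := visited.getD []
  let p := path.getD [vertex]
  DFSgo adjListEdges (adjListEdges.length + 2) vertex vis p

-- ===== PORT B =====
-- one stack frame = (current vertex, path, chain of vertices added beyond `base`)
-- fueled transcription of B's while loop; the fuel only makes it total (on Pre_DFS inputs
-- the number of pops is bounded by the fuel chosen in DFS_alt)
def DFSaltGo (adj : List (Int × List Int)) (base : List Int) :
    Nat → List (Int × List Int × List Int) → List (List Int) → List (List Int)
  | 0, _, out => out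
  | _+1, [], out => out
  | fuel+1, (v, p, chain) :: rest, out =>
    let out' := if chain ≠ [] then out ++ [p] else out
    match pvLookup adj v with
    | none => out'                          -- KeyError in Python (outside Pre_DFS)
    | some nbs =>
      DFSaltGo adj base fuel
        (nbs.reverse.foldl (fun st nb =>
          if nb ∉ base ∧ nb ∉ chain then (nb, p ++ [nb], chain ++ [nb]) :: st else st) rest)
        out'

def DFS_alt (adjListEdges : List (Int × List Int)) (vertex : Int) (visited : Option (List Int)) (path : Option (List Int)) : List (List Int) :=
  let vis := visited.getD []
  let p := path.getD [vertex]
  let base := vis ++ [vertex]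
  DFSaltGo adjListEdges base
    (((adjListEdges.map fun pr => pr.2.length).sum + 1) ^ (adjListEdges.length + 2))
    [(vertex, p, [])] []

-- ===== PRECONDITION & SPEC =====
-- Pre_DFS excludes the inputs on which A's dict indexing can raise KeyError: the start
-- vertex must be a key and every listed neighbor must be a key or already in the initial
-- visited list (then A never indexes it). This is a closed-form over-approximation of the
-- crash set: a graph whose only dangling neighbor is unreachable from the start vertex is
-- also excluded although A returns there (see claim.json "cites").
def Pre_DFS (adjListEdges : List (Int × List Int)) (vertex : Int) (visited : Option (List Int)) (path : Option (List Int)) : Prop :=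
  vertex ∈ adjListEdges.map Prod.fst ∧
  ∀ pr ∈ adjListEdges, ∀ nb ∈ pr.2,
    nb ∈ adjListEdges.map Prod.fst ∨ nb ∈ visited.getD []
instance (adjListEdges : List (Int × List Int)) (vertex : Int) (visited : Option (List Int)) (path : Option (List Int)) : Decidable (Pre_DFS adjListEdges vertex visited path) := by unfold Pre_DFS; infer_instance

def pvWitness_DFS : (List (Int × List Int)) × Int × Option (List Int) × Option (List Int) :=
  ([(0, [1, 2]), (1, [2]), (2, [])], 0, none, none)

def Spec_DFS (adjListEdges : List (Int × List Int)) (vertex : Int) (visited : Option (List Int)) (path : Option (List Int)) (out : List (List Int)) : Prop := out = DFS_alt adjListEdges vertex visited path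
instance (adjListEdges : List (Int × List Int)) (vertex : Int) (visited : Option (List Int)) (path : Option (List Int)) (out : List (List Int)) : Decidable (Spec_DFS adjListEdges vertex visited path out) := by unfold Spec_DFS; infer_instance

-- ===== CLAIM (what is proved, stated in full; the proofs are below) =====
def Claim_equal_DFS : Prop := ∀ (adjListEdges : List (Int × List Int)) (vertex : Int) (visited : Option (List Int)) (path : Option (List Int)), Dom_DFS adjListEdges vertex visited path → Pre_DFS adjListEdges vertex visited path → Spec_DFS adjListEdges vertex visited path (DFS adjListEdges vertex visited path)

-- ===== LEMMAS AND PROOFS =====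

-- neighbor-closure part of Pre_DFS
def pvClosed (adj : List (Int × List Int)) (vis0 : List Int) : Prop :=
  ∀ pr ∈ adj, ∀ nb ∈ pr.2, nb ∈ adj.map Prod.fst ∨ nb ∈ vis0

-- A's recursion rephrased on the visited list AFTER the append (W = visited ++ [vertex])
def expandW (adj : List (Int × List Int)) : Nat → Int → List Int → List Int → List (List Int)
  | 0, _, _, _ => []
  | f+1, v, W, p =>
    match pvLookup adj v with
    | none => []
    | some nbs =>
      nbs.flatMap (fun nb =>
        if nb ∉ W then (p ++ [nb]) :: expandW adj f nb (W ++ [nb]) (p ++ [nb]) else [])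

-- number of keys not yet visited (termination measure of A)
def pvCnt (adj : List (Int × List Int)) (W : List Int) : Nat :=
  ((adj.map Prod.fst).dedup.filter (fun k => k ∉ W)).length

def pvExpandF (adj : List (Int × List Int)) (base : List Int) (fr : Int × List Int × List Int) : List (List Int) :=
  expandW adj (adj.length + 2) fr.1 (base ++ fr.2.2) fr.2.1

def pvEmitF (adj : List (Int × List Int)) (base : List Int) (fr : Int × List Int × List Int) : List (List Int) :=
  (if fr.2.2 ≠ [] then [fr.2.1] else []) ++ pvExpandF adj base fr

def pvNeed (adj : List (Int × List Int)) (base : List Int) (fr : Int × List Int × List Int) : Nat :=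
  1 + (pvExpandF adj base fr).length

lemma pvLookup_mem {adj : List (Int × List Int)} {v : Int} {nbs : List Int}
    (h : pvLookup adj v = some nbs) : (v, nbs) ∈ adj := by
  induction adj with
  | nil => simp [pvLookup] at h
  | cons hd tl ih =>
    obtain ⟨k, w⟩ := hd
    by_cases hk : k = v
    · subst hk
      simp [pvLookup] at h
      simp [h]
    · simp [pvLookup, hk] at h
      exact List.mem_cons_of_mem _ (ih h)

lemma pvLookup_isSome {adj : List (Int × List Int)} {v : Int}
    (h : v ∈ adj.map Prod.fst) : ∃ nbs, pvLookup adj v = some nbs := by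
  induction adj with
  | nil => simp at h
  | cons hd tl ih =>
    obtain ⟨k, w⟩ := hd
    by_cases hk : k = v
    · exact ⟨w, by simp [pvLookup, hk]⟩
    · simp at h
      rcases h with h | h
      · exact absurd h.symm hk
      obtain ⟨nbs, hn⟩ := ih (by simpa using h)
      exact ⟨nbs, by simp [pvLookup, hk, hn]⟩

lemma DFSgo_eq_expandW (adj : List (Int × List Int)) :
    ∀ f v vis p, DFSgo adj f v vis p = expandW adj f v (vis ++ [v]) p := by
  intro f
  induction f with
  | zero => intro v vis p; simp [DFSgo, expandW]
  | succ f ih =>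
    intro v vis p
    rcases hl : pvLookup adj v with _ | nbs
    · simp [DFSgo, expandW, hl]
    · simp only [DFSgo, expandW, hl]
      have hfun : (fun (paths : List (List Int)) nb =>
          if nb ∉ vis ++ [v] then
            paths ++ [p ++ [nb]] ++ DFSgo adj f nb (vis ++ [v]) (p ++ [nb])
          else paths)
        = (fun (paths : List (List Int)) nb => paths ++
            (if nb ∉ vis ++ [v] then
              (p ++ [nb]) :: expandW adj f nb ((vis ++ [v]) ++ [nb]) (p ++ [nb]) else [])) := by
        funext paths nb
        split_ifs with h
        · simp
        · rw [ih]
          simp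
      rw [hfun, PySem.List.foldl_append_eq_flatMap]
      simp

lemma pvCnt_le (adj : List (Int × List Int)) (W : List Int) : pvCnt adj W ≤ adj.length := by
  unfold pvCnt
  calc ((adj.map Prod.fst).dedup.filter (fun k => k ∉ W)).length
      ≤ (adj.map Prod.fst).dedup.length := List.length_filter_le _ _
    _ ≤ (adj.map Prod.fst).length := (List.dedup_sublist _).length_le
    _ = adj.length := List.length_map _

lemma filter_out_le (l W : List Int) (a : Int) :
    (l.filter (fun k => k ∉ W ++ [a])).length ≤ (l.filter (fun k => k ∉ W)).length := by
  induction l with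
  | nil => simp
  | cons hd tl ih =>
    simp only [List.filter_cons]
    by_cases h2 : hd ∈ W
    · have h1 : hd ∈ W ++ [a] := by simp [h2]
      rw [if_neg (by simp only [decide_eq_true_eq, not_not]; exact h1), if_neg (by simp only [decide_eq_true_eq, not_not]; exact h2)]
      exact ih
    · by_cases h1 : hd ∈ W ++ [a]
      · rw [if_neg (by simp only [decide_eq_true_eq, not_not]; exact h1), if_pos (by simp only [decide_eq_true_eq]; exact h2)]
        simp only [List.length_cons]
        omega
      · rw [if_pos (by simp only [decide_eq_true_eq]; exact h1), if_pos (by simp only [decide_eq_true_eq]; exact h2)]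
        simp only [List.length_cons]
        omega

lemma filter_out_lt {l W : List Int} {a : Int} (ha : a ∈ l) (hw : a ∉ W) :
    (l.filter (fun k => k ∉ W ++ [a])).length < (l.filter (fun k => k ∉ W)).length := by
  induction l with
  | nil => simp at ha
  | cons hd tl ih =>
    simp only [List.filter_cons]
    by_cases he : hd = a
    · subst he
      rw [if_neg (by simp only [decide_eq_true_eq, not_not]; simp), if_pos (by simp only [decide_eq_true_eq]; exact hw)]
      simp only [List.length_cons]
      have := filter_out_le tl W hd
      omega
    · have ha' : a ∈ tl := by
        rcases List.mem_cons.mp ha with h | h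
        · exact absurd h.symm he
        · exact h
      have hlt := ih ha'
      have hiff : hd ∈ W ++ [a] ↔ hd ∈ W := by simp [he]
      by_cases h2 : hd ∈ W
      · rw [if_neg (by simp only [decide_eq_true_eq, not_not, hiff]; exact h2), if_neg (by simp only [decide_eq_true_eq, not_not]; exact h2)]
        exact hlt
      · rw [if_pos (by simp only [decide_eq_true_eq, hiff]; exact h2), if_pos (by simp only [decide_eq_true_eq]; exact h2)]
        simp only [List.length_cons]
        omega

lemma flatMap_congr_mem {α β : Type} {l : List α} {f g : α → List β}
    (h : ∀ x ∈ l, f x = g x) : l.flatMap f = l.flatMap g := by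
  induction l with
  | nil => simp
  | cons hd tl ih =>
    simp only [List.flatMap_cons]
    rw [h hd (by simp), ih (fun x hx => h x (List.mem_cons_of_mem _ hx))]

lemma pvCnt_dec {adj : List (Int × List Int)} {W : List Int} {nb : Int}
    (hk : nb ∈ adj.map Prod.fst) (hw : nb ∉ W) : pvCnt adj (W ++ [nb]) < pvCnt adj W := by
  unfold pvCnt
  exact filter_out_lt (List.mem_dedup.mpr hk) hw

lemma expandW_stable {adj : List (Int × List Int)} {vis0 : List Int} (hcl : pvClosed adj vis0) :
    ∀ n f1 f2 v W p, (∀ x ∈ vis0, x ∈ W) → pvCnt adj W ≤ n → n < f1 → n < f2 →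
      expandW adj f1 v W p = expandW adj f2 v W p := by
  intro n
  induction n with
  | zero =>
    intro f1 f2 v W p hsub hc h1 h2
    obtain ⟨a, rfl⟩ : ∃ a, f1 = a + 1 := ⟨f1 - 1, by omega⟩
    obtain ⟨b, rfl⟩ : ∃ b, f2 = b + 1 := ⟨f2 - 1, by omega⟩
    rcases hl : pvLookup adj v with _ | nbs
    · simp [expandW, hl]
    · simp only [expandW, hl]
      apply flatMap_congr_mem
      intro nb hnb
      by_cases hW : nb ∈ W
      · rw [if_neg (by simp [hW]), if_neg (by simp [hW])]
      · exfalso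
        have hk : nb ∈ adj.map Prod.fst := by
          rcases hcl _ (pvLookup_mem hl) nb hnb with h | h
          · exact h
          · exact absurd (hsub _ h) hW
        have hmem : nb ∈ (adj.map Prod.fst).dedup.filter (fun k => k ∉ W) :=
          List.mem_filter.mpr ⟨List.mem_dedup.mpr hk, by simp [hW]⟩
        have hpos := List.length_pos_of_mem hmem
        unfold pvCnt at hc
        omega
  | succ m ih =>
    intro f1 f2 v W p hsub hc h1 h2
    obtain ⟨a, rfl⟩ : ∃ a, f1 = a + 1 := ⟨f1 - 1, by omega⟩
    obtain ⟨b, rfl⟩ : ∃ b, f2 = b + 1 := ⟨f2 - 1, by omega⟩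
    rcases hl : pvLookup adj v with _ | nbs
    · simp [expandW, hl]
    · simp only [expandW, hl]
      apply flatMap_congr_mem
      intro nb hnb
      by_cases hW : nb ∈ W
      · rw [if_neg (by simp [hW]), if_neg (by simp [hW])]
      · rw [if_pos hW, if_pos hW]
        have hk : nb ∈ adj.map Prod.fst := by
          rcases hcl _ (pvLookup_mem hl) nb hnb with h | h
          · exact h
          · exact absurd (hsub _ h) hW
        have hdec := pvCnt_dec hk hW
        exact congrArg (List.cons _)
          (ih a b nb (W ++ [nb]) (p ++ [nb]) (fun x hx => by simp [hsub x hx])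
            (by omega) (by omega) (by omega))

lemma expandW_len_le (adj : List (Int × List Int)) :
    ∀ f v W p, (expandW adj f v W p).length + 1 ≤ ((adj.map fun pr => pr.2.length).sum + 1) ^ f := by
  intro f
  induction f with
  | zero => intro v W p; simp [expandW]
  | succ f ih =>
    intro v W p
    rcases hl : pvLookup adj v with _ | nbs
    · simp only [expandW, hl]
      simpa using Nat.one_le_pow (f + 1) _ (by omega)
    · simp only [expandW, hl]
      rw [List.length_flatMap]
      set S := (adj.map fun pr => pr.2.length).sum with hS
      have hlen : nbs.length ≤ S := by
        have hm : nbs.length ∈ adj.map (fun pr => pr.2.length) :=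
          List.mem_map_of_mem (pvLookup_mem hl)
        exact List.single_le_sum (fun x _ => Nat.zero_le x) _ hm
      have hone : 1 ≤ (S + 1) ^ f := Nat.one_le_pow _ _ (by omega)
      have hb : ∀ x ∈ nbs.map (fun nb =>
          (if nb ∉ W then (p ++ [nb]) :: expandW adj f nb (W ++ [nb]) (p ++ [nb]) else []).length),
          x ≤ (S + 1) ^ f := by
        intro x hx
        obtain ⟨nb, hnb, rfl⟩ := List.mem_map.mp hx
        by_cases hW : nb ∈ W
        · simp [hW]
        · rw [if_pos hW]
          simp only [List.length_cons]
          have := ih nb (W ++ [nb]) (p ++ [nb])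
          omega
      have hsum := List.sum_le_card_nsmul _ _ hb
      simp only [smul_eq_mul, List.length_map] at hsum
      have hmul : nbs.length * (S + 1) ^ f ≤ S * (S + 1) ^ f :=
        Nat.mul_le_mul_right _ hlen
      have hpow : (S + 1) ^ (f + 1) = S * (S + 1) ^ f + (S + 1) ^ f := by
        rw [pow_succ]
        ring
      omega

lemma push_eq {α β : Type} (c : α → Prop) [DecidablePred c] (h : α → β) (nbs : List α) (rest : List β) :
    nbs.reverse.foldl (fun st nb => if c nb then h nb :: st else st) rest
      = (nbs.flatMap (fun nb => if c nb then [h nb] else [])) ++ rest := by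
  induction nbs generalizing rest with
  | nil => simp
  | cons hd tl ih =>
    simp only [List.reverse_cons, List.foldl_append, List.foldl_cons, List.foldl_nil,
      List.flatMap_cons]
    by_cases hc : c hd
    · simp only [hc, if_pos]
      rw [ih]
      simp
    · simp only [hc, if_neg, not_false_iff]
      rw [ih]
      simp

lemma flatMap_if_map_sum {α β : Type} (c : α → Prop) [DecidablePred c] (g : α → β) (m : β → Nat) (l : List α) :
    ((l.flatMap (fun x => if c x then [g x] else [])).map m).sum
      = (l.map (fun x => if c x then m (g x) else 0)).sum := by
  induction l with
  | nil => simp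
  | cons hd tl ih =>
    by_cases hc : c hd <;> simp [hc, ih]

lemma flatMap_if_flatten_map {α β γ : Type} (c : α → Prop) [DecidablePred c] (g : α → β) (e : β → List γ) (l : List α) :
    ((l.flatMap (fun x => if c x then [g x] else [])).map e).flatten
      = l.flatMap (fun x => if c x then e (g x) else []) := by
  induction l with
  | nil => simp
  | cons hd tl ih =>
    by_cases hc : c hd <;> simp [hc, ih]

lemma expandW_succ {adj : List (Int × List Int)} (f : Nat) {v : Int} {W p nbs : List Int}
    (hl : pvLookup adj v = some nbs) :
    expandW adj (f + 1) v W p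
      = nbs.flatMap (fun nb => if nb ∉ W
          then (p ++ [nb]) :: expandW adj f nb (W ++ [nb]) (p ++ [nb]) else []) := by
  simp only [expandW, hl]

lemma expandF_unfold {adj : List (Int × List Int)} {base : List Int} {v : Int}
    {nbs p chain : List Int} {vis0 : List Int} (hcl : pvClosed adj vis0)
    (hsub : ∀ x ∈ vis0, x ∈ base) (hl : pvLookup adj v = some nbs) :
    pvExpandF adj base (v, p, chain)
      = nbs.flatMap (fun nb => if nb ∉ base ∧ nb ∉ chain
          then pvEmitF adj base (nb, p ++ [nb], chain ++ [nb]) else []) := by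
  show expandW adj (adj.length + 1 + 1) v (base ++ chain) p = _
  rw [expandW_succ (adj.length + 1) hl]
  apply flatMap_congr_mem
  intro nb hnb
  by_cases hc : nb ∈ base ++ chain
  · rw [if_neg (by simp at hc ⊢; tauto), if_neg (by simp at hc ⊢; tauto)]
  · have hc' : nb ∉ base ∧ nb ∉ chain := by simp at hc; tauto
    rw [if_pos (by simpa using hc), if_pos hc']
    simp only [pvEmitF, pvExpandF]
    rw [if_pos (show chain ++ [nb] ≠ [] by simp)]
    rw [← List.append_assoc]
    rw [expandW_stable hcl adj.length (adj.length + 1) (adj.length + 2) nb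
      ((base ++ chain) ++ [nb]) (p ++ [nb]) (fun x hx => by simp [hsub x hx])
      (pvCnt_le _ _) (by omega) (by omega)]
    simp

lemma bridge {adj : List (Int × List Int)} {base : List Int} {vis0 : List Int}
    (hcl : pvClosed adj vis0) (hsub : ∀ x ∈ vis0, x ∈ base) :
    ∀ fS stack out,
      (∀ fr ∈ stack, fr.1 ∈ adj.map Prod.fst) →
      (stack.map (pvNeed adj base)).sum ≤ fS →
      DFSaltGo adj base fS stack out = out ++ (stack.map (pvEmitF adj base)).flatten := by
  intro fS
  induction fS with
  | zero =>
    intro stack out hinv hsum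
    cases stack with
    | nil => simp [DFSaltGo]
    | cons fr rest =>
      exfalso
      simp only [List.map_cons, List.sum_cons, pvNeed] at hsum
      omega
  | succ fS ih =>
    intro stack out hinv hsum
    cases stack with
    | nil => simp [DFSaltGo]
    | cons fr rest =>
      obtain ⟨v, p, chain⟩ := fr
      have hvK : v ∈ adj.map Prod.fst := hinv (v, p, chain) (by exact List.mem_cons_self ..)
      obtain ⟨nbs, hl⟩ := pvLookup_isSome hvK
      simp only [DFSaltGo, hl]
      rw [push_eq (c := fun nb => nb ∉ base ∧ nb ∉ chain)
        (h := fun nb => (nb, p ++ [nb], chain ++ [nb]))]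
      have hEF := expandF_unfold (base := base) (p := p) (chain := chain) hcl hsub hl
      have hClen : (((nbs.flatMap (fun nb => if nb ∉ base ∧ nb ∉ chain
            then [(nb, p ++ [nb], chain ++ [nb])] else [])).map (pvNeed adj base)).sum)
          = (pvExpandF adj base (v, p, chain)).length := by
        rw [flatMap_if_map_sum, hEF, List.length_flatMap]
        apply congrArg List.sum
        apply List.map_congr_left
        intro nb _
        by_cases hc : nb ∉ base ∧ nb ∉ chain
        · rw [if_pos hc, if_pos hc]
          simp [pvNeed, pvEmitF]
          omega
        · rw [if_neg hc, if_neg hc]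
          simp
      have hsum1 : pvNeed adj base (v, p, chain) + (rest.map (pvNeed adj base)).sum ≤ fS + 1 := by
        simpa using hsum
      rw [ih]
      · have hflatC : (((nbs.flatMap (fun nb => if nb ∉ base ∧ nb ∉ chain
              then [(nb, p ++ [nb], chain ++ [nb])] else [])).map (pvEmitF adj base)).flatten)
            = pvExpandF adj base (v, p, chain) := by
          rw [flatMap_if_flatten_map, hEF]
        simp only [List.map_append, List.flatten_append, hflatC, List.map_cons,
          List.flatten_cons]
        by_cases hch : chain ≠ [] <;>
          simp [pvEmitF, hch, List.append_assoc]
      · intro fr hfr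
        rcases List.mem_append.mp hfr with hfr | hfr
        · simp only [List.mem_flatMap] at hfr
          obtain ⟨nb, hnb, hin⟩ := hfr
          by_cases hc : nb ∉ base ∧ nb ∉ chain
          · rw [if_pos hc] at hin
            simp at hin
            subst hin
            rcases hcl _ (pvLookup_mem hl) nb hnb with h | h
            · exact h
            · exact absurd (hsub _ h) hc.1
          · rw [if_neg hc] at hin
            simp at hin
        · exact hinv _ (List.mem_cons_of_mem _ hfr)
      · rw [List.map_append, List.sum_append, hClen]
        have : pvNeed adj base (v, p, chain) = 1 + (pvExpandF adj base (v, p, chain)).length := rfl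
        omega

-- ===== VERDICT (by name: the statement is the Claim_ definition above) =====
theorem DFS_spec : Claim_equal_DFS := by
  intro adj vertex visited path _ hpre
  obtain ⟨hvK, hcl⟩ := hpre
  show DFS adj vertex visited path = DFS_alt adj vertex visited path
  simp only [DFS, DFS_alt]
  rw [DFSgo_eq_expandW]
  rw [bridge (base := (visited.getD []) ++ [vertex]) hcl
    (fun x hx => List.mem_append_left _ hx) _ _ _
    (by intro fr hfr; simp at hfr; subst hfr; exact hvK)
    (by
      simp only [List.map_cons, List.map_nil, List.sum_cons, List.sum_nil, pvNeed,
        pvExpandF, List.append_nil, Nat.add_zero]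
      have := expandW_len_le adj (adj.length + 2) vertex ((visited.getD []) ++ [vertex])
        (path.getD [vertex])
      omega)]
  simp [pvEmitF, pvExpandF]
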